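-- pv_equiv track=rewrite | github.com/voynow/espn-fantasy-football | utils/get_player_data.py | transform
-- ===== SOURCE A (Python) =====
-- def transform(raw_data, metadata):
--     """
--     Data transformation from raw to structured
--     """
--     data_len = metadata['table_length']
--     master_dataset = []
--
--     # iterate over pages
--     for page in raw_data:
--
--         # collect all data associated with each player
--         page_data = [[] for i in range(data_len)]
--         for i, data_set in enumerate(page):
--             for data in data_set:
--                 page_data[i % data_len].append(data)
--
--         # remove empty data and health status
--         for player in page_data:
--             if len(player) == 0:
--                 continue
--             if len(player) == 20:
--                 player.pop(1)
--             master_dataset.append(player)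
--
--     return master_dataset
-- ===== SOURCE B (Python) =====
-- def transform(raw_data, metadata):
--     """
--     Data transformation from raw to structured
--     """
--     data_len = metadata['table_length']
--     master_dataset = []
--
--     # gather each player's row directly from the strided data sets
--     for page in raw_data:
--         for j in range(data_len):
--             player = [d for i in range(j, len(page), data_len) for d in page[i]]
--             if not player:
--                 continue
--             if len(player) == 20:
--                 del player[1]
--             master_dataset.append(player)
--
--     return master_dataset
-- ===== Notes on version B (the rewrite author's own statement) =====
-- stated objective: simpler
-- what changed: Replaces the scatter-into-buckets pass (allocate data_len empty buckets, distribute every datum by i % data_len, then a second cleanup pass) with a single direct gather: each player's row is built in one comprehension from the strided data sets page[j], page[j+data_len], ..., and cleaned up inline.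
import Mathlib
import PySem

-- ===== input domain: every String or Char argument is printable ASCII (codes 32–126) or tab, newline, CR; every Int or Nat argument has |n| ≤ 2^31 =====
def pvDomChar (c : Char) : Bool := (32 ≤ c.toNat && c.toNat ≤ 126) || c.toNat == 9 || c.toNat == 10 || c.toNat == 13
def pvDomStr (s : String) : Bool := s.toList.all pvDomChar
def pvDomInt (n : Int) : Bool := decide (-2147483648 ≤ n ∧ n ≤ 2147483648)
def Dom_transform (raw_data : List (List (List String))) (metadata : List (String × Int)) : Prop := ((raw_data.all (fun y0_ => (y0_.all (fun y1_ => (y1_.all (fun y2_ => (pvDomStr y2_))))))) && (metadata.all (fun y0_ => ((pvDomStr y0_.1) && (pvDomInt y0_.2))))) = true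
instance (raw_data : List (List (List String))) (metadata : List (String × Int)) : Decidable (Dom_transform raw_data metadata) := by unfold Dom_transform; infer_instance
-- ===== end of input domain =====

-- B drops A's scatter-into-buckets array and builds each player's row directly from the
-- strided data sets page[j::data_len] in one gather pass (simpler decomposition, same cost).

-- ===== PORT A =====
-- page_data[i % data_len].append(data)  (Python raises on an invalid index; such inputs are outside Pre_)
def pvBucketPush (L : Int) (pd : List (List String)) (i : Int) (d : String) : List (List String) :=
  PySem.List.pySetD pd (PySem.Int.mod i L) (PySem.List.pyGetD pd (PySem.Int.mod i L) [] ++ [d])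

def transform (raw_data : List (List (List String))) (metadata : List (String × Int)) : List (List String) :=
  match List.lookup "table_length" metadata with
  | none => []  -- Python: KeyError (outside Pre_)
  | some data_len =>
    raw_data.foldl (fun master page =>
      -- page_data = [[] for i in range(data_len)]; scatter loop
      let page_data :=
        (PySem.List.enumerate page).foldl
          (fun pd p => p.2.foldl (fun pd d => pvBucketPush data_len pd p.1 d) pd)
          ((PySem.List.pyRange 0 data_len 1).map (fun _ => ([] : List String)))
      -- cleanup loop
      page_data.foldl (fun m player =>
        if player.length = 0 then m
        else
          let player := if player.length = 20 then ((PySem.List.pop? player 1).elim player Prod.snd) else player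
          m ++ [player]) master) []

-- ===== PORT B =====
def transform_alt (raw_data : List (List (List String))) (metadata : List (String × Int)) : List (List String) :=
  match List.lookup "table_length" metadata with
  | none => []  -- Python: KeyError (outside Pre_)
  | some data_len =>
    raw_data.foldl (fun master page =>
      (PySem.List.pyRange 0 data_len 1).foldl (fun m j =>
        -- player = [d for i in range(j, len(page), data_len) for d in page[i]]
        let player := (PySem.List.pyRange j (page.length : Int) data_len).flatMap
          (fun i => PySem.List.pyGetD page i [])
        if player = [] then m
        else
          let player := if player.length = 20 then player.eraseIdx 1 else player
          m ++ [player]) master) []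

-- ===== PRECONDITION & SPEC =====
-- Pre_ excludes exactly the inputs on which A raises: a missing 'table_length' key (KeyError),
-- and table_length ≤ 0 together with some non-empty data set (ZeroDivisionError / IndexError).
def Pre_transform (raw_data : List (List (List String))) (metadata : List (String × Int)) : Prop :=
  (List.lookup "table_length" metadata).isSome = true ∧
  (0 < (List.lookup "table_length" metadata).getD 0 ∨
    ∀ page ∈ raw_data, ∀ ds ∈ page, ds = ([] : List String))
instance (raw_data : List (List (List String))) (metadata : List (String × Int)) : Decidable (Pre_transform raw_data metadata) := by unfold Pre_transform; infer_instance

def pvWitness_transform : List (List (List String)) × (List (String × Int)) :=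
  ([[["a"], ["b"], ["c"]]], [("table_length", 2)])

def Spec_transform (raw_data : List (List (List String))) (metadata : List (String × Int)) (out : List (List String)) : Prop := out = transform_alt raw_data metadata
instance (raw_data : List (List (List String))) (metadata : List (String × Int)) (out : List (List String)) : Decidable (Spec_transform raw_data metadata out) := by unfold Spec_transform; infer_instance

-- ===== CLAIM (what is proved, stated in full; the proofs are below) =====
def Claim_equal_transform : Prop := ∀ (raw_data : List (List (List String))) (metadata : List (String × Int)), Dom_transform raw_data metadata → Pre_transform raw_data metadata → Spec_transform raw_data metadata (transform raw_data metadata)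

-- ===== LEMMAS AND PROOFS =====

-- the data gathered for bucket j: all data sets whose index is ≡ j mod N, flattened in order
def pvGatherF (page : List (List String)) (j N : Nat) : List String :=
  ((List.range page.length).filter (fun i => decide (i % N = j))).flatMap (fun i => page.getD i [])

theorem pv_append_fold (ds : List String) (pd : List (List String)) (k : Nat) (hk : k < pd.length) :
    ds.foldl (fun pd d => pd.set k (pd.getD k [] ++ [d])) pd = pd.set k (pd.getD k [] ++ ds) := by
  induction ds generalizing pd with
  | nil => simp [List.getD_eq_getElem?_getD, List.getElem?_eq_getElem hk]
  | cons d ds ih =>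
    simp only [List.foldl_cons]
    rw [ih _ (by simpa using hk)]
    simp [List.getD_eq_getElem?_getD, hk]

theorem pv_gatherF_append (xs : List (List String)) (ds : List String) (j N : Nat) :
    pvGatherF (xs ++ [ds]) j N
      = pvGatherF xs j N ++ (if xs.length % N = j then ds else []) := by
  unfold pvGatherF
  rw [List.length_append, List.length_singleton, List.range_succ, List.filter_append,
    List.flatMap_append]
  congr 1
  · rw [List.flatMap_def, List.flatMap_def]
    congr 1
    refine List.map_congr_left (fun i hi => ?_)
    have hilt : i < xs.length := List.mem_range.mp (List.mem_of_mem_filter hi)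
    simp [List.getD_eq_getElem?_getD, List.getElem?_append_left hilt]
  · by_cases h : xs.length % N = j <;>
      simp [h, List.getD_eq_getElem?_getD]

theorem pv_map_range_set (N k : Nat) (_hk : k < N) (ds : List String) (f g : Nat → List String)
    (h : ∀ j < N, g j = f j ++ (if k = j then ds else [])) :
    (List.range N).map g = ((List.range N).map f).set k (f k ++ ds) := by
  apply List.ext_getElem
  · simp
  · intro i h1 h2
    have hiN : i < N := by simpa using h1
    rw [List.getElem_map, List.getElem_set]
    simp only [List.getElem_range]
    rw [h i hiN]
    by_cases hik : k = i
    · subst hik; simp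
    · simp [hik]

theorem pv_scatter_eq (L : Int) (hL : 0 < L) (page : List (List String)) :
    (PySem.List.enumerate page).foldl
        (fun pd p => p.2.foldl (fun pd d => pvBucketPush L pd p.1 d) pd)
        ((PySem.List.pyRange 0 L 1).map (fun _ => ([] : List String)))
      = (List.range L.toNat).map (fun j => pvGatherF page j L.toNat) := by
  have hLN : L = ((L.toNat : Nat) : Int) := by omega
  have hN : 0 < L.toNat := by omega
  induction page using List.reverseRecOn with
  | nil =>
    rw [PySem.List.pyRange_zero]
    simp [PySem.List.enumerate, pvGatherF, Function.comp_def, List.map_const']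
  | append_singleton xs ds ih =>
    rw [PySem.List.enumerate_append, List.foldl_append, ih]
    have hstep : PySem.List.enumerate [ds] (0 + (xs.length : Int)) = [((xs.length : Int), ds)] := by
      simp [PySem.List.enumerate]
    rw [hstep, List.foldl_cons, List.foldl_nil]
    have hmod : PySem.Int.mod ((xs.length : Int)) L = ((xs.length % L.toNat : Nat) : Int) := by
      rw [hLN, PySem.Int.mod_natCast]
      simp
    have hk : xs.length % L.toNat < L.toNat := Nat.mod_lt _ hN
    have hpush : ∀ (pd : List (List String)) (d : String),
        pvBucketPush L pd ((xs.length : Int)) d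
          = pd.set (xs.length % L.toNat) (pd.getD (xs.length % L.toNat) [] ++ [d]) := by
      intro pd d
      unfold pvBucketPush
      rw [hmod, PySem.List.pySetD_natCast, PySem.List.pyGetD_natCast]
    have hlen : ((List.range L.toNat).map (fun j => pvGatherF xs j L.toNat)).length = L.toNat := by
      simp
    calc ds.foldl (fun pd d => pvBucketPush L pd ((xs.length : Int)) d)
            ((List.range L.toNat).map (fun j => pvGatherF xs j L.toNat))
        = ds.foldl (fun pd d => pd.set (xs.length % L.toNat) (pd.getD (xs.length % L.toNat) [] ++ [d]))
            ((List.range L.toNat).map (fun j => pvGatherF xs j L.toNat)) := by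
          congr 1
          funext pd d
          exact hpush pd d
      _ = ((List.range L.toNat).map (fun j => pvGatherF xs j L.toNat)).set (xs.length % L.toNat)
            (((List.range L.toNat).map (fun j => pvGatherF xs j L.toNat)).getD (xs.length % L.toNat) [] ++ ds) := by
          exact pv_append_fold ds _ _ (by rw [hlen]; exact hk)
      _ = (List.range L.toNat).map (fun j => pvGatherF (xs ++ [ds]) j L.toNat) := by
          rw [eq_comm]
          have hget : ((List.range L.toNat).map (fun j => pvGatherF xs j L.toNat)).getD (xs.length % L.toNat) []
              = pvGatherF xs (xs.length % L.toNat) L.toNat := by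
            rw [List.getD_eq_getElem?_getD]
            rw [List.getElem?_map, List.getElem?_range hk]
            rfl
          rw [hget]
          exact pv_map_range_set _ _ hk ds _ _ (fun j hj => pv_gatherF_append xs ds j L.toNat)

theorem pv_pyRange_eq_filter (len N j : Nat) (hj : j < N) :
    PySem.List.pyRange (j : Int) (len : Int) (N : Int)
      = ((List.range len).filter (fun i => decide (i % N = j))).map (fun i : Nat => (i : Int)) := by
  have hN : (0 : Int) < (N : Int) := by exact_mod_cast Nat.pos_of_ne_zero (by omega)
  have hmemL : ∀ x : Int, x ∈ PySem.List.pyRange (j : Int) (len : Int) (N : Int) ↔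
      (j : Int) ≤ x ∧ x < (len : Int) ∧ (N : Int) ∣ x - j :=
    fun x => PySem.List.mem_pyRange_iff_of_pos hN x
  -- both sides are strictly increasing with the same members
  have hsortedL : (PySem.List.pyRange (j : Int) (len : Int) (N : Int)).Pairwise (· < ·) := by
    rw [PySem.List.pyRange_of_pos _ _ hN]
    refine List.pairwise_map.mpr (List.pairwise_lt_range.imp ?_)
    intro a b hab
    have hab' : (a : Int) < (b : Int) := by exact_mod_cast hab
    nlinarith
  have hsortedR : (((List.range len).filter (fun i => decide (i % N = j))).map
      (fun i : Nat => (i : Int))).Pairwise (· < ·) := by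
    refine List.pairwise_map.mpr ?_
    refine (List.Pairwise.sublist List.filter_sublist List.pairwise_lt_range).imp ?_
    intro a b hab
    exact_mod_cast hab
  have hmem : ∀ x : Int, x ∈ PySem.List.pyRange (j : Int) (len : Int) (N : Int) ↔
      x ∈ ((List.range len).filter (fun i => decide (i % N = j))).map (fun i : Nat => (i : Int)) := by
    intro x
    rw [hmemL, List.mem_map]
    constructor
    · rintro ⟨h1, h2, k, hk⟩
      have hk0 : 0 ≤ k := by nlinarith
      lift k to ℕ using hk0 with k'
      have hx : x = ((j + N * k' : Nat) : Int) := by push_cast; omega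
      refine ⟨j + N * k', ?_, hx.symm⟩
      rw [List.mem_filter, List.mem_range]
      refine ⟨by exact_mod_cast hx ▸ h2, ?_⟩
      simp [Nat.add_mul_mod_self_left, Nat.mod_eq_of_lt hj]
    · rintro ⟨i, hi, rfl⟩
      rw [List.mem_filter, List.mem_range] at hi
      obtain ⟨hilt, himod⟩ := hi
      have himod' : i % N = j := by simpa using himod
      have hNi : N * (i / N) + j = i := by
        conv_rhs => rw [← Nat.div_add_mod i N, himod']
      refine ⟨by omega, by exact_mod_cast hilt, ⟨((i / N : Nat) : Int), ?_⟩⟩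
      have hNi' := congrArg (fun n : Nat => (n : Int)) hNi
      push_cast at hNi'
      omega
  have hperm : (PySem.List.pyRange (j : Int) (len : Int) (N : Int)).Perm
      (((List.range len).filter (fun i => decide (i % N = j))).map (fun i : Nat => (i : Int))) := by
    rw [List.perm_ext_iff_of_nodup
      (hsortedL.imp ne_of_lt) (hsortedR.imp ne_of_lt)]
    exact hmem
  exact List.Perm.eq_of_pairwise
    (fun a b _ _ h1 h2 => (lt_asymm h1 h2).elim) hsortedL hsortedR hperm

theorem pv_player_eq (L : Int) (hL : 0 < L) (page : List (List String)) (j : Nat)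
    (hj : j < L.toNat) :
    (PySem.List.pyRange (j : Int) (page.length : Int) L).flatMap
        (fun i => PySem.List.pyGetD page i [])
      = pvGatherF page j L.toNat := by
  have hLN : L = ((L.toNat : Nat) : Int) := by omega
  rw [hLN, pv_pyRange_eq_filter page.length L.toNat j hj]
  unfold pvGatherF
  rw [List.flatMap_map]
  refine List.flatMap_congr (fun i hi => ?_)
  exact PySem.List.pyGetD_natCast page i []

theorem pv_cleanup_eq (m : List (List String)) (pl : List String) :
    (if pl.length = 0 then m
     else
       let pl := if pl.length = 20 then ((PySem.List.pop? pl 1).elim pl Prod.snd) else pl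
       m ++ [pl])
    = (if pl = [] then m
       else
         let pl := if pl.length = 20 then pl.eraseIdx 1 else pl
         m ++ [pl]) := by
  by_cases h0 : pl = []
  · simp [h0]
  · rw [if_neg (by simpa using h0), if_neg h0]
    by_cases h20 : pl.length = 20
    · have h1 : 1 < pl.length := by omega
      have hpop := PySem.List.pop?_natCast pl 1 h1
      simp only [Nat.cast_one] at hpop
      simp [h20, hpop]
    · simp [h20]

theorem pv_foldl_self {α β : Type} (l : List β) (a : α) :
    l.foldl (fun a _ => a) a = a := by
  induction l generalizing a with
  | nil => rfl
  | cons x xs ih => exact ih a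

-- ===== VERDICT (by name: the statement is the Claim_ definition above) =====
theorem transform_spec : Claim_equal_transform := by
  intro raw md _dom hpre
  unfold Spec_transform transform transform_alt
  obtain ⟨hsome, hcase⟩ := hpre
  rcases hget : List.lookup "table_length" md with _ | L
  · simp [hget] at hsome
  · rw [hget] at hcase
    simp only [Option.getD_some] at hcase
    dsimp only
    by_cases hL : 0 < L
    · -- main case: the two per-page step functions agree
      congr 1
      funext master page
      rw [pv_scatter_eq L hL page, List.foldl_map]
      have hzero : PySem.List.pyRange 0 L 1 = (List.range L.toNat).map (fun k : Nat => (k : Int)) :=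
        PySem.List.pyRange_zero L
      rw [hzero, List.foldl_map]
      refine PySem.List.foldl_congr_mem _ _ _ _ (fun m j hj => ?_)
      have hjN : j < L.toNat := List.mem_range.mp hj
      rw [pv_player_eq L hL page j hjN]
      exact pv_cleanup_eq m (pvGatherF page j L.toNat)
    · -- degenerate case: table_length ≤ 0 and every data set is empty; both return []
      have hall : ∀ page ∈ raw, ∀ ds ∈ page, ds = ([] : List String) := hcase.resolve_left hL
      have hnil : PySem.List.pyRange 0 L 1 = [] :=
        PySem.List.pyRange_one_eq_nil (by omega)
      have hA : raw.foldl (fun master page =>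
          ((PySem.List.enumerate page).foldl
            (fun pd p => p.2.foldl (fun pd d => pvBucketPush L pd p.1 d) pd)
            ((PySem.List.pyRange 0 L 1).map (fun _ => ([] : List String)))).foldl
            (fun m player =>
              if player.length = 0 then m
              else
                let player := if player.length = 20 then ((PySem.List.pop? player 1).elim player Prod.snd) else player
                m ++ [player]) master) ([] : List (List String))
          = raw.foldl (fun master _ => master) [] := by
        refine PySem.List.foldl_congr_mem _ _ _ _ (fun master page hpage => ?_)
        have hscatter : (PySem.List.enumerate page).foldl
            (fun pd p => p.2.foldl (fun pd d => pvBucketPush L pd p.1 d) pd)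
            ((PySem.List.pyRange 0 L 1).map (fun _ => ([] : List String))) = [] := by
          rw [hnil, List.map_nil]
          have : (PySem.List.enumerate page).foldl
              (fun pd p => p.2.foldl (fun pd d => pvBucketPush L pd p.1 d) pd)
              ([] : List (List String))
              = (PySem.List.enumerate page).foldl (fun pd _ => pd) [] := by
            refine PySem.List.foldl_congr_mem _ _ _ _ (fun pd p hp => ?_)
            have hp2 : p.2 ∈ page := by
              have := PySem.List.map_snd_enumerate page (0 : Int)
              exact this ▸ List.mem_map_of_mem hp
            rw [hall page hpage p.2 hp2]
            rfl
          rw [this, pv_foldl_self]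
        rw [hscatter]
        rfl
      have hB : raw.foldl (fun master page =>
          (PySem.List.pyRange 0 L 1).foldl (fun m j =>
            let player := (PySem.List.pyRange j (page.length : Int) L).flatMap
              (fun i => PySem.List.pyGetD page i [])
            if player = [] then m
            else
              let player := if player.length = 20 then player.eraseIdx 1 else player
              m ++ [player]) master) ([] : List (List String))
          = raw.foldl (fun master _ => master) [] := by
        refine PySem.List.foldl_congr_mem _ _ _ _ (fun master page _ => ?_)
        rw [hnil]
        rfl
      rw [hA, hB]
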